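-- pv_equiv track=rewrite | github.com/mattyray/reporadar | backend/apps/prospects/tasks.py | _build_tree_summary
-- ===== SOURCE A (Python) =====
-- def _build_tree_summary(paths: list[str]) -> str:
--     """Build a condensed directory tree from a list of file paths.
--
--     Shows top-level structure and first 2 levels of nesting, with file
--     counts for deeper directories. This keeps the tree readable without
--     overwhelming Claude's context.
--     """
--     if not paths:
--         return "(empty or inaccessible)"
--
--     # Group by top-level directory
--     top_level = {}
--     root_files = []
--
--     for path in paths:
--         parts = path.split("/")
--         if len(parts) == 1:
--             root_files.append(path)
--         else:
--             top_dir = parts[0]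
--             if top_dir not in top_level:
--                 top_level[top_dir] = []
--             top_level[top_dir].append("/".join(parts[1:]))
--
--     lines = []
--
--     # Root files
--     for f in sorted(root_files):
--         lines.append(f)
--
--     # Directories with contents summary
--     for dir_name in sorted(top_level.keys()):
--         children = top_level[dir_name]
--         sub_files = [c for c in children if "/" not in c]
--         sub_dirs = set(c.split("/")[0] for c in children if "/" in c)
--
--         lines.append(f"{dir_name}/")
--         for sf in sorted(sub_files)[:10]:
--             lines.append(f"  {sf}")
--         if len(sub_files) > 10:
--             lines.append(f"  ... and {len(sub_files) - 10} more files")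
--         for sd in sorted(sub_dirs):
--             count = sum(1 for c in children if c.startswith(sd + "/") or c == sd)
--             lines.append(f"  {sd}/ ({count} items)")
--
--     # Cap total output
--     if len(lines) > 200:
--         lines = lines[:200]
--         lines.append(f"... ({len(paths)} total files)")
--
--     return "\n".join(lines)
-- ===== SOURCE B (Python) =====
-- def _build_tree_summary(paths: list[str]) -> str:
--     """One-pass grouping: per top-level dir keep direct sub-files, a counter of
--     second-level components, and the set of second-level dir names; then emit."""
--     if not paths:
--         return "(empty or inaccessible)"
--
--     root_files = []
--     tops = {}  # top_dir -> (sub_files, counter of second components, subdir set)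
--
--     for path in paths:
--         parts = path.split("/")
--         if len(parts) == 1:
--             root_files.append(path)
--             continue
--         files, cnt, dirs = tops.setdefault(parts[0], ([], {}, set()))
--         second = parts[1]
--         cnt[second] = cnt.get(second, 0) + 1
--         if len(parts) == 2:
--             files.append(second)
--         else:
--             dirs.add(second)
--
--     lines = sorted(root_files)
--     for top in sorted(tops):
--         files, cnt, dirs = tops[top]
--         lines.append(top + "/")
--         ordered = sorted(files)
--         lines.extend("  " + f for f in ordered[:10])
--         if len(ordered) > 10:
--             lines.append("  ... and %d more files" % (len(ordered) - 10))
--         lines.extend("  %s/ (%d items)" % (sd, cnt[sd]) for sd in sorted(dirs))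
--
--     if len(lines) > 200:
--         lines = lines[:200]
--         lines.append("... (%d total files)" % len(paths))
--     return "\n".join(lines)
-- ===== Notes on version B (the rewrite author's own statement) =====
-- stated objective: alternative
-- what changed: A rescans each directory's children three times at emission (a filter, a set comprehension, and one full scan per subdirectory to count its items); B instead builds, in a single grouping pass over the paths, per top-level directory the direct sub-files, a counter of second-level components and the set of subdirectory names, so emission only reads precomputed data.
import Mathlib
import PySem

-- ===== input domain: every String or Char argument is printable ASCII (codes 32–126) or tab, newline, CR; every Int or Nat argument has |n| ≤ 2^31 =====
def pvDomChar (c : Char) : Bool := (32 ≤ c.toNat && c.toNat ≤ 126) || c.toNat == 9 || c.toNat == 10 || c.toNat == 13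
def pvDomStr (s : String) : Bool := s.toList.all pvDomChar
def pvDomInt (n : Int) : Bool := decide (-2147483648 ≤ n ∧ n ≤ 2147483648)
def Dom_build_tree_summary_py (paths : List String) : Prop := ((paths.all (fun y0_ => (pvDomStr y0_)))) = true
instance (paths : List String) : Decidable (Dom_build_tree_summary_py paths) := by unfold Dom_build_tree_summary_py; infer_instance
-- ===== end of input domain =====

-- B replaces A's per-directory rescans (a filter, a set comprehension and one full scan of the
-- children per subdirectory) by a single grouping pass that maintains, per top-level directory,
-- the direct sub-files, a counter of second-level components and the set of subdirectory names.

-- ===== PORT A =====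
-- shared primitive: Python's path.split("/") (sep "/" is nonempty, so split? never fails)
def pySplit (s : String) : List String := (PySem.Str.split? s "/").getD []

-- body of A's grouping loop: `for path in paths: …` over (top_level, root_files)
def stepA (st : PySem.Dict String (List String) × List String) (path : String) :
    PySem.Dict String (List String) × List String :=
  let parts := pySplit path
  if parts.length = 1 then (st.1, st.2 ++ [path])
  else
    let top_dir := PySem.List.pyGetD parts 0 ""
    let tl := if st.1.contains top_dir then st.1 else st.1.insert top_dir []
    (tl.modify top_dir [] (fun l => l ++ [PySem.Str.join "/" (PySem.List.slice parts (some 1) none)]), st.2)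

-- body of A's `for dir_name in sorted(top_level.keys()): …`
def emitA (top_level : PySem.Dict String (List String)) (lines : List String) (dir_name : String) :
    List String :=
  let children := top_level.getD dir_name []
  let sub_files := children.filter (fun c => !(PySem.Str.isIn "/" c))
  let sub_dirs := PySem.Set.ofList ((children.filter (fun c => PySem.Str.isIn "/" c)).map
    (fun c => PySem.List.pyGetD (pySplit c) 0 ""))
  let lines := lines ++ [dir_name ++ "/"]
  let lines := (PySem.List.slice (PySem.List.sorted sub_files (fun x => x) false) none (some 10)).foldl
    (fun ls sf => ls ++ ["  " ++ sf]) lines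
  let lines := if 10 < PySem.List.len sub_files then
      lines ++ ["  ... and " ++ PySem.Int.toStr (PySem.List.len sub_files - 10) ++ " more files"]
    else lines
  (PySem.List.sorted sub_dirs (fun x => x) false).foldl (fun ls sd =>
    ls ++ ["  " ++ sd ++ "/ (" ++
      PySem.Int.toStr (children.foldl
        (fun acc c => if PySem.Str.startswith c (sd ++ "/") || c == sd then acc + 1 else acc) (0 : Int)) ++
      " items)"]) lines

def build_tree_summary_py (paths : List String) : String :=
  if paths = [] then "(empty or inaccessible)" else
  let st := paths.foldl stepA (PySem.Dict.empty, [])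
  -- for f in sorted(root_files): lines.append(f)
  let lines := (PySem.List.sorted st.2 (fun x => x) false).foldl (fun ls f => ls ++ [f]) []
  let lines := (PySem.List.sorted st.1.keys (fun x => x) false).foldl (emitA st.1) lines
  let lines := if 200 < PySem.List.len lines then
      PySem.List.slice lines none (some 200) ++ ["... (" ++ PySem.Int.toStr (PySem.List.len paths) ++ " total files)"]
    else lines
  PySem.Str.join "\n" lines

-- ===== PORT B =====
-- body of B's single grouping pass: tops[top] = (sub_files, counter of second components, subdir set)
def stepB (st : List String × PySem.Dict String (List String × PySem.Dict String Int × PySem.Set String))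
    (path : String) :
    List String × PySem.Dict String (List String × PySem.Dict String Int × PySem.Set String) :=
  let parts := pySplit path
  if parts.length = 1 then (st.1 ++ [path], st.2)
  else
    let top := PySem.List.pyGetD parts 0 ""
    let tops := st.2.setdefault top ([], PySem.Dict.empty, PySem.Set.empty)
    let e := tops.getD top ([], PySem.Dict.empty, PySem.Set.empty)
    let second := PySem.List.pyGetD parts 1 ""
    let cnt := e.2.1.insert second (e.2.1.getD second 0 + 1)
    let e' := if parts.length = 2 then (e.1 ++ [second], cnt, e.2.2)
              else (e.1, cnt, PySem.Set.add e.2.2 second)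
    (st.1, tops.insert top e')

-- body of B's `for top in sorted(tops): …` — only reads precomputed parts of the entry
def emitB (tops : PySem.Dict String (List String × PySem.Dict String Int × PySem.Set String))
    (lines : List String) (top : String) : List String :=
  let e := tops.getD top ([], PySem.Dict.empty, PySem.Set.empty)
  let ordered := PySem.List.sorted e.1 (fun x => x) false
  let lines := lines ++ [top ++ "/"]
  let lines := lines ++ (PySem.List.slice ordered none (some 10)).map (fun f => "  " ++ f)
  let lines := if 10 < PySem.List.len ordered then
      lines ++ ["  ... and " ++ PySem.Int.toStr (PySem.List.len ordered - 10) ++ " more files"]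
    else lines
  lines ++ (PySem.List.sorted e.2.2 (fun x => x) false).map
    (fun sd => "  " ++ sd ++ "/ (" ++ PySem.Int.toStr (e.2.1.getD sd 0) ++ " items)")

def build_tree_summary_py_alt (paths : List String) : String :=
  if paths = [] then "(empty or inaccessible)" else
  let st := paths.foldl stepB ([], PySem.Dict.empty)
  let lines := PySem.List.sorted st.1 (fun x => x) false
  let lines := (PySem.List.sorted st.2.keys (fun x => x) false).foldl (emitB st.2) lines
  let lines := if 200 < PySem.List.len lines then
      PySem.List.slice lines none (some 200) ++ ["... (" ++ PySem.Int.toStr (PySem.List.len paths) ++ " total files)"]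
    else lines
  PySem.Str.join "\n" lines

-- ===== PRECONDITION & SPEC =====
def Spec_build_tree_summary_py (paths : List String) (out : String) : Prop := out = build_tree_summary_py_alt paths
instance (paths : List String) (out : String) : Decidable (Spec_build_tree_summary_py paths out) := by unfold Spec_build_tree_summary_py; infer_instance

-- ===== CLAIM (what is proved, stated in full; the proofs are below) =====
def Claim_equal_build_tree_summary_py : Prop := ∀ (paths : List String), Dom_build_tree_summary_py paths → Spec_build_tree_summary_py paths (build_tree_summary_py paths)

-- ===== LEMMAS AND PROOFS =====

def split1 : List Char → List (List Char)
  | [] => [[]]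
  | c :: r => if c = '/' then [] :: split1 r
              else ((c :: (split1 r).headI) :: (split1 r).tail)

theorem split1_ne_nil (cs : List Char) : split1 cs ≠ [] := by
  cases cs with
  | nil => simp [split1]
  | cons c r => simp only [split1]; split <;> simp

theorem go_spec (fuel : Nat) : ∀ (l cur : List Char) (accs : List (List Char)),
    l.length < fuel →
    PySem.Chars.splitOn.go ['/'] fuel l cur accs = accs.reverse ++ (cur.reverse ++ (split1 l).headI) :: (split1 l).tail := by
  induction fuel with
  | zero => intro l cur accs hl; omega
  | succ f ih =>
    intro l cur accs hl
    cases l with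
    | nil => simp [PySem.Chars.splitOn.go, split1]
    | cons c rest =>
      rw [PySem.Chars.splitOn.go]
      by_cases hc : c = '/'
      · subst hc
        have hpre : List.isPrefixOf ['/'] ('/' :: rest) = true := by simp [List.isPrefixOf]
        simp only [hpre, if_pos, List.length_cons, List.drop_succ_cons, List.length_nil, List.drop_zero]
        rw [ih rest [] _ (by simpa using Nat.lt_of_succ_lt_succ hl)]
        obtain ⟨h, t, he⟩ := List.exists_cons_of_ne_nil (split1_ne_nil rest)
        simp [split1, he]
      · have hpre : List.isPrefixOf ['/'] (c :: rest) = false := by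
          simp [List.isPrefixOf]; exact fun h => absurd h.symm hc
        simp only [hpre, Bool.false_eq_true, if_neg, not_false_iff]
        rw [ih rest (c :: cur) _ (by simpa using Nat.lt_of_succ_lt_succ hl)]
        obtain ⟨h, t, he⟩ := List.exists_cons_of_ne_nil (split1_ne_nil rest)
        simp [split1, he, hc]

theorem splitOn_eq_split1 (cs : List Char) : PySem.Chars.splitOn cs ['/'] = split1 cs := by
  rw [PySem.Chars.splitOn, go_spec (cs.length + 1) cs [] [] (by omega)]
  obtain ⟨h, t, he⟩ := List.exists_cons_of_ne_nil (split1_ne_nil cs)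
  simp [he]

theorem mem_split1_not_slash (cs : List Char) : ∀ p ∈ split1 cs, '/' ∉ p := by
  induction cs with
  | nil => simp [split1]
  | cons c r ih =>
    simp only [split1]
    split
    · simpa using ih
    · rename_i hc
      obtain ⟨h, t, he⟩ := List.exists_cons_of_ne_nil (split1_ne_nil r)
      rw [he]
      intro p hp
      simp only [List.headI_cons, List.tail_cons, List.mem_cons] at hp
      rcases hp with rfl | hp
      · intro hm
        rcases List.mem_cons.mp hm with rfl | hm'
        · exact hc rfl
        · exact ih h (by simp [he]) hm'
      · exact ih p (by simp [he, hp])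

theorem split1_of_not_slash (cs : List Char) (h : '/' ∉ cs) : split1 cs = [cs] := by
  induction cs with
  | nil => rfl
  | cons c r ih =>
    simp only [List.mem_cons, not_or] at h
    simp [split1, Ne.symm h.1, ih h.2]

theorem split1_append_slash (x r : List Char) (hx : '/' ∉ x) :
    split1 (x ++ '/' :: r) = x :: split1 r := by
  induction x with
  | nil => simp [split1]
  | cons c xr ih =>
    simp only [List.mem_cons, not_or] at hx
    have := ih hx.2
    simp [split1, this, Ne.symm hx.1]

theorem split1_intercalate (ls : List (List Char)) (hne : ls ≠ [])
    (hfree : ∀ p ∈ ls, '/' ∉ p) : split1 (List.intercalate ['/'] ls) = ls := by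
  induction ls with
  | nil => exact absurd rfl hne
  | cons h t ih =>
    cases t with
    | nil => simp [List.intercalate, split1_of_not_slash h (hfree h (by simp))]
    | cons h2 t2 =>
      have : List.intercalate ['/'] (h :: h2 :: t2) = h ++ '/' :: List.intercalate ['/'] (h2 :: t2) := by
        simp [List.intercalate]
      rw [this, split1_append_slash h _ (hfree h (by simp)),
        ih (by simp) (fun p hp => hfree p (by simp [hp]))]

theorem join_split1 (cs : List Char) : List.intercalate ['/'] (split1 cs) = cs := by
  induction cs with
  | nil => simp [split1, List.intercalate]
  | cons c r ih =>
    obtain ⟨h, t, he⟩ := List.exists_cons_of_ne_nil (split1_ne_nil r)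
    simp only [split1]
    split
    · rename_i hc
      subst hc
      rw [he] at ih ⊢
      simpa [List.intercalate] using ih
    · rw [he] at ih ⊢
      cases t with
      | nil => simpa [List.intercalate] using ih
      | cons t1 t2 =>
        simp only [List.headI_cons, List.tail_cons]
        simp [List.intercalate] at ih ⊢
        simp [ih]

theorem slash_mem_iff (cs : List Char) : '/' ∈ cs ↔ 2 ≤ (split1 cs).length := by
  induction cs with
  | nil => simp [split1]
  | cons c r ih =>
    obtain ⟨h, t, he⟩ := List.exists_cons_of_ne_nil (split1_ne_nil r)
    simp only [split1]
    split
    · rename_i hc; subst hc; simp [he]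
    · rename_i hc
      rw [he] at ih ⊢
      simp only [List.headI_cons, List.tail_cons, List.mem_cons, List.length_cons] at ih ⊢
      constructor
      · rintro (rfl | hm)
        · exact absurd rfl hc
        · exact ih.mp hm
      · intro hl; right; exact ih.mpr hl

theorem prefix_slash_iff (x sd : List Char) (r : List Char) (hx : '/' ∉ x) (hsd : '/' ∉ sd) :
    ((sd ++ ['/']) <+: (x ++ '/' :: r)) ↔ sd = x := by
  induction sd generalizing x with
  | nil =>
    cases x with
    | nil => simp
    | cons xc xr =>
      simp only [List.nil_append, List.cons_append]
      constructor
      · intro hp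
        rw [List.cons_prefix_cons] at hp
        exact absurd hp.1.symm (fun h => hx (h ▸ List.mem_cons_self))
      · intro h; exact absurd h (by simp)
  | cons sc sr ih =>
    cases x with
    | nil =>
      simp only [List.nil_append, List.cons_append, List.cons_prefix_cons]
      constructor
      · rintro ⟨rfl, -⟩; exact absurd (List.mem_cons_self) hsd
      · intro h; exact absurd h (by simp)
    | cons xc xr =>
      simp only [List.cons_append, List.cons_prefix_cons]
      have hx' : '/' ∉ xr := fun h => hx (List.mem_cons_of_mem _ h)
      have hsd' : '/' ∉ sr := fun h => hsd (List.mem_cons_of_mem _ h)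
      rw [ih xr hx' hsd']
      constructor
      · rintro ⟨rfl, rfl⟩; rfl
      · intro h; injection h with h1 h2; exact ⟨h1, h2⟩

theorem pySplit_eq (s : String) : pySplit s = (split1 s.toList).map String.ofList := by
  simp [pySplit, PySem.Str.split?, PySem.Chars.split?, splitOn_eq_split1]

theorem pySplit_ne_nil (s : String) : pySplit s ≠ [] := by
  rw [pySplit_eq]
  simpa using split1_ne_nil s.toList

theorem join_toList (ps : List String) :
    (PySem.Str.join "/" ps).toList = List.intercalate ['/'] (ps.map String.toList) := by
  simp [PySem.Str.join, PySem.Chars.join]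

theorem mem_pySplit_not_slash (s p : String) (hp : p ∈ pySplit s) : '/' ∉ p.toList := by
  rw [pySplit_eq] at hp
  obtain ⟨q, hq, rfl⟩ := List.mem_map.mp hp
  rw [String.toList_ofList]
  exact mem_split1_not_slash s.toList q hq

theorem pySplit_join (ps : List String) (hne : ps ≠ [])
    (hfree : ∀ p ∈ ps, '/' ∉ p.toList) : pySplit (PySem.Str.join "/" ps) = ps := by
  rw [pySplit_eq, join_toList,
    split1_intercalate (ps.map String.toList) (by simpa using hne)
      (by intro p hp; obtain ⟨q, hq, rfl⟩ := List.mem_map.mp hp; exact hfree q hq)]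
  simp [List.map_map, Function.comp_def, String.ofList_toList]

theorem isIn_slash_iff (c : String) : PySem.Str.isIn "/" c = true ↔ 2 ≤ (pySplit c).length := by
  rw [PySem.Str.isIn_iff_infix]
  have h1 : ("/" : String).toList = ['/'] := rfl
  rw [h1, List.singleton_infix_iff, slash_mem_iff, pySplit_eq, List.length_map]

theorem firstComp_cons (c h : String) (t : List String) (he : pySplit c = h :: t) :
    PySem.List.pyGetD (pySplit c) 0 "" = h := by
  rw [he, PySem.List.pyGetD_zero_cons]

theorem count_pt (c sd : String) (hsd : '/' ∉ sd.toList) :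
    ((PySem.Str.startswith c (sd ++ "/") || c == sd) = true) ↔
      PySem.List.pyGetD (pySplit c) 0 "" = sd := by
  obtain ⟨h, t, he⟩ := List.exists_cons_of_ne_nil (split1_ne_nil c.toList)
  have hps : pySplit c = String.ofList h :: t.map String.ofList := by
    rw [pySplit_eq, he]; rfl
  have hfc : PySem.List.pyGetD (pySplit c) 0 "" = String.ofList h := firstComp_cons _ _ _ hps
  have hh : '/' ∉ h := mem_split1_not_slash c.toList h (he ▸ List.mem_cons_self)
  have hc : c.toList = List.intercalate ['/'] (h :: t) := by rw [← he, join_split1]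
  have hsw : PySem.Str.startswith c (sd ++ "/") = true ↔ (sd.toList ++ ['/']) <+: c.toList := by
    rw [PySem.Str.startswith_eq, PySem.Chars.startswith_iff, String.toList_append]
    rfl
  rw [hfc]
  have hofl : (String.ofList h = sd) ↔ h = sd.toList := by
    constructor
    · rintro rfl; exact String.toList_ofList.symm
    · rintro rfl; exact String.ofList_toList
  cases t with
  | nil =>
    have hcl : c.toList = h := by simpa [List.intercalate] using hc
    have hnosw : PySem.Str.startswith c (sd ++ "/") = false := by
      rw [Bool.eq_false_iff]
      intro hw
      exact hh (hcl ▸ (hsw.mp hw).mem (by simp))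
    rw [hnosw]
    simp only [Bool.false_or, beq_iff_eq]
    rw [hofl, ← String.toList_inj, hcl]
  | cons t1 t2 =>
    have hcl : c.toList = h ++ '/' :: List.intercalate ['/'] (t1 :: t2) := by
      simpa [List.intercalate] using hc
    have hne : (c == sd) = false := by
      rw [beq_eq_false_iff_ne]
      rintro rfl
      exact hsd (by rw [hcl]; simp)
    rw [hne, Bool.or_false, hsw, hcl, prefix_slash_iff h sd.toList _ hh hsd, hofl]
    exact ⟨fun a => a.symm, fun a => a.symm⟩

def summ (ch : List String) : List String × PySem.Dict String Int × PySem.Set String :=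
  (ch.filter (fun c => !(PySem.Str.isIn "/" c)),
   PySem.Dict.counter (ch.map (fun c => PySem.List.pyGetD (pySplit c) 0 "")),
   PySem.Set.ofList ((ch.filter (fun c => PySem.Str.isIn "/" c)).map
     (fun c => PySem.List.pyGetD (pySplit c) 0 "")))

def mapvD (d : PySem.Dict String (List String)) :
    PySem.Dict String (List String × PySem.Dict String Int × PySem.Set String) :=
  PySem.Dict.mk (d.items.map (fun p => (p.1, summ p.2)))

theorem contains_mapvD (d : PySem.Dict String (List String)) (k : String) :
    (mapvD d).contains k = d.contains k := by
  simp [mapvD, PySem.Dict.contains, List.any_map, Function.comp_def]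

theorem keys_mapvD (d : PySem.Dict String (List String)) : (mapvD d).keys = d.keys := by
  simp [mapvD, PySem.Dict.keys, List.map_map, Function.comp_def]

theorem get?_mapvD (d : PySem.Dict String (List String)) (k : String) :
    (mapvD d).get? k = (d.get? k).map summ := by
  obtain ⟨items⟩ := d
  induction items with
  | nil => rfl
  | cons p rest ih =>
    obtain ⟨pk, pv⟩ := p
    have h1 : mapvD ⟨(pk, pv) :: rest⟩ = ⟨(pk, summ pv) :: (mapvD ⟨rest⟩).items⟩ := rfl
    rw [h1, PySem.Dict.get?_mk_cons, PySem.Dict.get?_mk_cons]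
    by_cases hk : (pk == k) = true
    · simp [hk]
    · simp only [hk, Bool.false_eq_true, if_neg, not_false_iff]
      exact ih

theorem getD_mapvD (d : PySem.Dict String (List String)) (k : String) (w : List String) :
    (mapvD d).getD k (summ w) = summ (d.getD k w) := by
  rw [PySem.Dict.getD, PySem.Dict.getD, get?_mapvD]
  cases d.get? k <;> simp

theorem insert_mapvD (d : PySem.Dict String (List String)) (k : String) (v : List String) :
    (mapvD d).insert k (summ v) = mapvD (d.insert k v) := by
  apply PySem.Dict.ext
  simp only [PySem.Dict.insert, contains_mapvD]
  by_cases hc : d.contains k = true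
  · simp only [hc, if_pos, mapvD, List.map_map]
    apply List.map_congr_left
    intro p _
    by_cases hp : p.1 = k <;> simp [hp]
  · simp only [hc, Bool.false_eq_true, if_neg, not_false_iff, mapvD, List.map_append]
    rfl

theorem getD_absent {ν : Type} (d : PySem.Dict String ν) (k : String) (w : ν)
    (hc : d.contains k = false) : d.getD k w = w := by
  have h0 : d.get? k = none := by
    rw [PySem.Dict.get?_eq_none_iff_not_mem_keys]
    intro hm
    rw [PySem.Dict.contains_eq_decide_mem_keys] at hc
    simp at hc
    exact hc hm
  rw [PySem.Dict.getD, h0, Option.getD_none]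

theorem A_op (d : PySem.Dict String (List String)) (k : String) (g : List String → List String) :
    (if d.contains k then d else d.insert k []).modify k [] g = d.insert k (g (d.getD k [])) := by
  by_cases hc : d.contains k = true
  · simp [hc, PySem.Dict.modify]
  · have hc' : d.contains k = false := by simpa using hc
    simp only [hc', Bool.false_eq_true, if_neg, not_false_iff, PySem.Dict.modify]
    rw [PySem.Dict.getD, PySem.Dict.get?_insert_self, Option.getD_some,
      PySem.Dict.insert_insert_self, getD_absent d k [] hc']

theorem B_op {ν : Type} (d : PySem.Dict String ν) (k : String) (w : ν) (g : ν → ν) :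
    (d.setdefault k w).insert k (g ((d.setdefault k w).getD k w)) = d.insert k (g (d.getD k w)) := by
  by_cases hc : d.contains k = true
  · rw [PySem.Dict.setdefault_of_contains d w hc]
  · have hc' : d.contains k = false := by simpa using hc
    rw [PySem.Dict.setdefault_of_not_contains d w hc', PySem.Dict.getD,
      PySem.Dict.get?_insert_self, Option.getD_some, PySem.Dict.insert_insert_self,
      getD_absent d k w hc']

theorem firstComp_not_slash (c : String) : '/' ∉ (PySem.List.pyGetD (pySplit c) 0 "").toList := by
  obtain ⟨h, t, he⟩ := List.exists_cons_of_ne_nil (pySplit_ne_nil c)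
  rw [firstComp_cons c h t he]
  exact mem_pySplit_not_slash c h (he ▸ List.mem_cons_self)

theorem count_eq (children : List String) (sd : String) (hsd : '/' ∉ sd.toList) :
    children.foldl
      (fun acc c => if PySem.Str.startswith c (sd ++ "/") || c == sd then acc + 1 else acc) (0 : Int)
    = (PySem.Dict.counter (children.map (fun c => PySem.List.pyGetD (pySplit c) 0 ""))).getD sd 0 := by
  rw [PySem.List.foldl_if_add_one, PySem.Dict.getD_counter, zero_add, List.count_eq_countP,
    List.countP_map]
  have hfun : (fun c => PySem.Str.startswith c (sd ++ "/") || c == sd)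
      = ((fun x => x == sd) ∘ fun c => PySem.List.pyGetD (pySplit c) 0 "") := by
    funext c
    simp only [Function.comp_def]
    rw [Bool.eq_iff_iff, beq_iff_eq]
    exact count_pt c sd hsd
  rw [hfun]

theorem pyGetD_one (p0 p1 : String) (t : List String) :
    PySem.List.pyGetD (p0 :: p1 :: t) (1 : Int) "" = p1 := by
  simp [PySem.List.pyGetD, PySem.List.pyGet?, PySem.List.pyIdx?]

theorem entry_step (path : String) (hl : 2 ≤ (pySplit path).length) (v : List String) :
    (if (pySplit path).length = 2
     then ((summ v).1 ++ [PySem.List.pyGetD (pySplit path) 1 ""],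
           (summ v).2.1.insert (PySem.List.pyGetD (pySplit path) 1 "")
             ((summ v).2.1.getD (PySem.List.pyGetD (pySplit path) 1 "") 0 + 1),
           (summ v).2.2)
     else ((summ v).1,
           (summ v).2.1.insert (PySem.List.pyGetD (pySplit path) 1 "")
             ((summ v).2.1.getD (PySem.List.pyGetD (pySplit path) 1 "") 0 + 1),
           PySem.Set.add (summ v).2.2 (PySem.List.pyGetD (pySplit path) 1 "")))
    = summ (v ++ [PySem.Str.join "/" (PySem.List.slice (pySplit path) (some 1) none)]) := by
  obtain ⟨p0, rest, h0⟩ := List.exists_cons_of_ne_nil (pySplit_ne_nil path)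
  obtain ⟨p1, t, h1⟩ := List.exists_cons_of_ne_nil
    (by rintro rfl; rw [h0] at hl; simp at hl : rest ≠ [])
  have hparts : pySplit path = p0 :: p1 :: t := by rw [h0, h1]
  set c := PySem.Str.join "/" (PySem.List.slice (pySplit path) (some 1) none) with hc
  have hslice : PySem.List.slice (pySplit path) (some 1) none = p1 :: t := by
    rw [PySem.List.slice_from _ (by norm_num : (0:Int) ≤ 1), hparts]
    rfl
  have hfree : ∀ p ∈ p1 :: t, '/' ∉ p.toList := by
    intro p hp
    exact mem_pySplit_not_slash path p (by rw [hparts]; exact List.mem_cons_of_mem _ hp)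
  have hpc : pySplit c = p1 :: t := by
    rw [hc, hslice]
    exact pySplit_join _ (by simp) hfree
  have hsecond : PySem.List.pyGetD (pySplit path) 1 "" = p1 := by rw [hparts, pyGetD_one]
  have hfcc : PySem.List.pyGetD (pySplit c) 0 "" = p1 := firstComp_cons _ _ _ hpc
  cases t with
  | nil =>
    have hlen2 : (pySplit path).length = 2 := by rw [hparts]; rfl
    have hcp1 : c = p1 := by
      rw [← String.toList_inj, hc, hslice, join_toList]
      simp [List.intercalate]
    rw [hcp1] at hpc hfcc ⊢
    have hnoslash : PySem.Str.isIn "/" p1 = false := by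
      rw [Bool.eq_false_iff]
      intro hw
      have h2 := (isIn_slash_iff p1).mp hw
      rw [hpc] at h2
      simp at h2
    simp only [hlen2, if_pos, summ, hsecond]
    simp only [List.filter_append, List.map_append, List.filter_singleton, hnoslash,
      Bool.not_false, if_pos, List.map_singleton, hfcc, Bool.false_eq_true, if_neg,
      not_false_iff, List.append_nil, PySem.Dict.counter_append_singleton]
    simp only [Bool.cond_true, Bool.cond_false, List.append_nil, PySem.Dict.modify, List.map_nil]
  | cons t1 t2 =>
    have hlen3 : ¬ (pySplit path).length = 2 := by rw [hparts]; simp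
    have hslash : PySem.Str.isIn "/" c = true := by
      rw [isIn_slash_iff, hpc]
      simp
    simp only [hlen3, if_neg, not_false_iff, summ, hsecond]
    simp only [List.filter_append, List.map_append, List.filter_singleton, hslash,
      Bool.not_true, Bool.false_eq_true, if_neg, not_false_iff, if_pos, List.append_nil,
      List.map_singleton, hfcc, PySem.Dict.counter_append_singleton, PySem.Set.ofList_append]
    simp [PySem.Dict.modify, PySem.Set.update]
    rw [hfcc]

theorem step_sim (dA : PySem.Dict String (List String)) (rA : List String) (path : String) :
    stepB (rA, mapvD dA) path = ((stepA (dA, rA) path).2, mapvD (stepA (dA, rA) path).1) := by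
  by_cases h1 : (pySplit path).length = 1
  · simp [stepA, stepB, h1]
  · have hl : 2 ≤ (pySplit path).length := by
      have h0 : (pySplit path).length ≠ 0 := by
        simpa [List.length_eq_zero_iff] using pySplit_ne_nil path
      omega
    simp only [stepA, stepB, h1, if_neg, not_false_iff]
    rw [Prod.mk.injEq]
    refine ⟨rfl, ?_⟩
    rw [B_op (mapvD dA) (PySem.List.pyGetD (pySplit path) 0 "") (([], PySem.Dict.empty, PySem.Set.empty))
      (fun e => if (pySplit path).length = 2
        then (e.1 ++ [PySem.List.pyGetD (pySplit path) 1 ""],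
              e.2.1.insert (PySem.List.pyGetD (pySplit path) 1 "")
                (e.2.1.getD (PySem.List.pyGetD (pySplit path) 1 "") 0 + 1), e.2.2)
        else (e.1,
              e.2.1.insert (PySem.List.pyGetD (pySplit path) 1 "")
                (e.2.1.getD (PySem.List.pyGetD (pySplit path) 1 "") 0 + 1),
              PySem.Set.add e.2.2 (PySem.List.pyGetD (pySplit path) 1 "")))]
    rw [A_op dA (PySem.List.pyGetD (pySplit path) 0 "")
      (fun l => l ++ [PySem.Str.join "/" (PySem.List.slice (pySplit path) (some 1) none)])]
    have hw : (([], PySem.Dict.empty, PySem.Set.empty) :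
        List String × PySem.Dict String Int × PySem.Set String) = summ [] := rfl
    rw [hw, getD_mapvD]
    rw [entry_step path hl (dA.getD (PySem.List.pyGetD (pySplit path) 0 "") [])]
    rw [insert_mapvD]

theorem phase1 (paths : List String) : ∀ (dA : PySem.Dict String (List String)) (rA : List String),
    paths.foldl stepB (rA, mapvD dA)
      = ((paths.foldl stepA (dA, rA)).2, mapvD (paths.foldl stepA (dA, rA)).1) := by
  induction paths with
  | nil => intro dA rA; rfl
  | cons p ps ih =>
    intro dA rA
    rw [List.foldl_cons, List.foldl_cons, step_sim]
    exact ih (stepA (dA, rA) p).1 (stepA (dA, rA) p).2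

theorem block_eq (d : PySem.Dict String (List String)) (lines : List String) (k : String) :
    (let e := (mapvD d).getD k ([], PySem.Dict.empty, PySem.Set.empty)
     let ordered := PySem.List.sorted e.1 (fun x => x) false
     let lines := lines ++ [k ++ "/"]
     let lines := lines ++ (PySem.List.slice ordered none (some 10)).map (fun f => "  " ++ f)
     let lines := if 10 < PySem.List.len ordered then
         lines ++ ["  ... and " ++ PySem.Int.toStr (PySem.List.len ordered - 10) ++ " more files"]
       else lines
     lines ++ (PySem.List.sorted e.2.2 (fun x => x) false).map
       (fun sd => "  " ++ sd ++ "/ (" ++ PySem.Int.toStr (e.2.1.getD sd 0) ++ " items)"))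
    = (let children := d.getD k []
       let sub_files := children.filter (fun c => !(PySem.Str.isIn "/" c))
       let sub_dirs := PySem.Set.ofList ((children.filter (fun c => PySem.Str.isIn "/" c)).map
         (fun c => PySem.List.pyGetD (pySplit c) 0 ""))
       let lines := lines ++ [k ++ "/"]
       let lines := (PySem.List.slice (PySem.List.sorted sub_files (fun x => x) false) none (some 10)).foldl
         (fun ls sf => ls ++ ["  " ++ sf]) lines
       let lines := if 10 < PySem.List.len sub_files then
           lines ++ ["  ... and " ++ PySem.Int.toStr (PySem.List.len sub_files - 10) ++ " more files"]
         else lines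
       (PySem.List.sorted sub_dirs (fun x => x) false).foldl (fun ls sd =>
         ls ++ ["  " ++ sd ++ "/ (" ++
           PySem.Int.toStr (children.foldl
             (fun acc c => if PySem.Str.startswith c (sd ++ "/") || c == sd then acc + 1 else acc) (0 : Int)) ++
           " items)"]) lines) := by
  have hw : (([], PySem.Dict.empty, PySem.Set.empty) :
      List String × PySem.Dict String Int × PySem.Set String) = summ [] := rfl
  rw [hw, getD_mapvD]
  simp only [summ]
  rw [PySem.List.foldl_append_singleton_eq_map (fun sf => "  " ++ sf)]
  rw [PySem.List.foldl_append_singleton_eq_map (fun sd => "  " ++ sd ++ "/ (" ++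
    PySem.Int.toStr ((d.getD k []).foldl
      (fun acc c => if PySem.Str.startswith c (sd ++ "/") || c == sd then acc + 1 else acc) (0 : Int)) ++
    " items)")]
  rw [show PySem.List.len (PySem.List.sorted ((d.getD k []).filter (fun c => !(PySem.Str.isIn "/" c)))
      (fun x => x) false) = PySem.List.len ((d.getD k []).filter (fun c => !(PySem.Str.isIn "/" c))) by
    simp [PySem.List.len_eq, PySem.List.length_sorted]]
  congr 1
  apply List.map_congr_left
  intro sd hsd
  have hmem : sd ∈ PySem.Set.ofList (((d.getD k []).filter (fun c => PySem.Str.isIn "/" c)).map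
      (fun c => PySem.List.pyGetD (pySplit c) 0 "")) := (PySem.List.mem_sorted _ _ _ _).mp hsd
  rw [PySem.Set.mem_ofList] at hmem
  obtain ⟨c, -, rfl⟩ := List.mem_map.mp hmem
  rw [count_eq _ _ (firstComp_not_slash c)]

theorem emit_eq (d : PySem.Dict String (List String)) : emitB (mapvD d) = emitA d := by
  funext lines k
  exact block_eq d lines k

theorem main_eq (paths : List String) :
    build_tree_summary_py paths = build_tree_summary_py_alt paths := by
  by_cases hp : paths = []
  · simp [build_tree_summary_py, build_tree_summary_py_alt, hp]
  · simp only [build_tree_summary_py, build_tree_summary_py_alt, if_neg hp]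
    have hB : List.foldl stepB ([], PySem.Dict.empty) paths
        = ((List.foldl stepA (PySem.Dict.empty, []) paths).2,
           mapvD (List.foldl stepA (PySem.Dict.empty, []) paths).1) :=
      phase1 paths PySem.Dict.empty []
    rw [hB, keys_mapvD, emit_eq, PySem.List.foldl_append_singleton, List.nil_append]

-- ===== VERDICT (by name: the statement is the Claim_ definition above) =====
theorem build_tree_summary_py_spec : Claim_equal_build_tree_summary_py := by
  intro paths _
  unfold Spec_build_tree_summary_py
  exact main_eq paths
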